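-- pv_equiv track=rewrite | github.com/JINS-DE/Data-Structure-and-Algorithm | 프로그래머스/3/12938. 최고의 집합/최고의 집합.py | solution
-- ===== SOURCE A (Python) =====
-- def solution(n, s):
--     if s//n==0:
--         return [-1]
--     answer=[]
--     for i in range(n,0,-1):
--         tmp=s//i
--         answer.append(tmp)
--         s-=tmp
--     return answer
-- ===== SOURCE B (Python) =====
-- def solution(n, s):
--     q, r = divmod(s, n)
--     if q == 0:
--         return [-1]
--     return [q] * (n - r) + [q + 1] * r
-- ===== Notes on version B (the rewrite author's own statement) =====
-- stated objective: simpler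
-- what changed: Replaces A's loop that greedily distributes s over n slots (tmp = s//i for i = n..1) with the closed form from divmod(s, n): n-r copies of q followed by r copies of q+1.
import Mathlib
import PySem

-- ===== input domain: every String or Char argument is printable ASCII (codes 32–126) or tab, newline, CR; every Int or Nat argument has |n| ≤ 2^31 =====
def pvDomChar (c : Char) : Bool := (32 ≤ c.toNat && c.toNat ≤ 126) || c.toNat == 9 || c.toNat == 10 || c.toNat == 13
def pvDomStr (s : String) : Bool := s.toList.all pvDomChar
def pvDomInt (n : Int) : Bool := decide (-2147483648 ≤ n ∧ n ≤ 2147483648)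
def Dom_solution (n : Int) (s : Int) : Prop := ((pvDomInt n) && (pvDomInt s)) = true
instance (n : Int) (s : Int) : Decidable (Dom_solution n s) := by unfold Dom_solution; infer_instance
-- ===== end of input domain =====

-- B replaces A's greedy loop with the divmod closed form; objective: simpler.

-- ===== PORT A =====
def solution (n : Int) (s : Int) : List Int :=
  if PySem.Int.floordiv s n == 0 then [-1]
  else
    ((PySem.List.pyRange n 0 (-1)).foldl
      (fun (st : List Int × Int) i =>
        let tmp := PySem.Int.floordiv st.2 i
        (st.1 ++ [tmp], st.2 - tmp)) ([], s)).1

-- ===== PORT B =====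
def solution_alt (n : Int) (s : Int) : List Int :=
  let q := PySem.Int.floordiv s n
  let r := PySem.Int.mod s n
  if q == 0 then [-1]
  else List.replicate (n - r).toNat q ++ List.replicate r.toNat (q + 1)

-- ===== PRECONDITION & SPEC =====
-- Pre_ excludes exactly n = 0, where Python A raises ZeroDivisionError.
def Pre_solution (n : Int) (s : Int) : Prop := n ≠ 0
instance (n : Int) (s : Int) : Decidable (Pre_solution n s) := by unfold Pre_solution; infer_instance
def pvWitness_solution : Int × Int := (2, 7)
def Spec_solution (n : Int) (s : Int) (out : List Int) : Prop := out = solution_alt n s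
instance (n : Int) (s : Int) (out : List Int) : Decidable (Spec_solution n s out) := by unfold Spec_solution; infer_instance

-- ===== CLAIM (what is proved, stated in full; the proofs are below) =====
def Claim_equal_solution : Prop := ∀ (n : Int) (s : Int), Dom_solution n s → Pre_solution n s → Spec_solution n s (solution n s)

-- ===== LEMMAS AND PROOFS =====

-- The list A's loop builds, as a structural recursion on the number of remaining slots.
def distr : Nat → Int → List Int
  | 0, _ => []
  | k+1, s =>
      PySem.Int.floordiv s ((k:Int)+1) :: distr k (s - PySem.Int.floordiv s ((k:Int)+1))

theorem fold_eq_distr (k : Nat) (acc : List Int) (s : Int) :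
    (PySem.List.pyRange (k : Int) 0 (-1)).foldl
      (fun (st : List Int × Int) i =>
        let tmp := PySem.Int.floordiv st.2 i
        (st.1 ++ [tmp], st.2 - tmp)) (acc, s)
    = (acc ++ distr k s, s - (distr k s).sum) := by
  induction k generalizing acc s with
  | zero => simp [PySem.List.pyRange_neg_one_eq_nil (by norm_num : (0:Int) ≤ 0), distr]
  | succ m ih =>
      rw [PySem.List.pyRange_neg_one_cons (by exact_mod_cast Nat.succ_pos m)]
      have h1 : ((m+1 : Nat) : Int) - 1 = (m : Int) := by push_cast; ring
      simp only [List.foldl_cons, h1]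
      rw [ih]
      simp [distr]
      ring

theorem distr_closed (k : Nat) (hk : 0 < k) (s : Int) :
    distr k s = List.replicate ((k:Int) - PySem.Int.mod s k).toNat (PySem.Int.floordiv s k)
              ++ List.replicate (PySem.Int.mod s k).toNat (PySem.Int.floordiv s k + 1) := by
  induction k generalizing s with
  | zero => omega
  | succ m ih =>
      have hpos : (0:Int) < (m:Int) + 1 := by positivity
      have hq : PySem.Int.floordiv s ((m:Int)+1) = s / ((m:Int)+1) :=
        PySem.Int.floordiv_eq_ediv_of_pos hpos
      have hr : PySem.Int.mod s ((m:Int)+1) = s % ((m:Int)+1) :=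
        PySem.Int.mod_eq_emod_of_pos hpos
      set q := s / ((m:Int)+1) with hqdef
      set r := s % ((m:Int)+1) with hrdef
      have hr0 : 0 ≤ r := Int.emod_nonneg s (by omega)
      have hrlt : r < (m:Int)+1 := Int.emod_lt_of_pos s hpos
      have hs : s = ((m:Int)+1) * q + r := by
        rw [hqdef, hrdef]; linarith [Int.ediv_add_emod s ((m:Int)+1)]
      have hcast : ((m+1 : Nat) : Int) = (m:Int) + 1 := by push_cast; ring
      rw [show distr (m+1) s = PySem.Int.floordiv s ((m:Int)+1) ::
            distr m (s - PySem.Int.floordiv s ((m:Int)+1)) from rfl]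
      rw [hcast, hq, hr]
      rcases Nat.eq_zero_or_pos m with hm | hm
      · subst hm
        simp only [Nat.cast_zero, zero_add] at *
        have : r = 0 := by omega
        simp [distr, this]
      · have ihm := ih hm (s - q)
        rw [ihm, PySem.Int.floordiv_eq_ediv_of_pos (by exact_mod_cast hm),
            PySem.Int.mod_eq_emod_of_pos (by exact_mod_cast hm)]
        have hs' : s - q = (m:Int) * q + r := by rw [hs]; ring
        by_cases hcase : r < (m:Int)
        · have hq' : (s - q) / (m:Int) = q := by
            rw [hs', add_comm, Int.add_mul_ediv_left r q (by omega : (m:Int) ≠ 0),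
                Int.ediv_eq_zero_of_lt hr0 hcase]
            omega
          have hr' : (s - q) % (m:Int) = r := by
            rw [hs', add_comm, Int.add_mul_emod_self_left]
            exact Int.emod_eq_of_lt hr0 hcase
          rw [hq', hr']
          have e1 : ((m:Int) - r).toNat + 1 = ((m:Int) + 1 - r).toNat := by omega
          rw [← e1, List.replicate_succ]
          simp
        · have hre : r = (m:Int) := by omega
          have hq' : (s - q) / (m:Int) = q + 1 := by
            rw [hs', hre, show (m:Int) * q + (m:Int) = ((q+1) * (m:Int)) by ring]
            exact Int.mul_ediv_cancel _ (by omega)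
          have hr' : (s - q) % (m:Int) = 0 := by
            rw [hs', hre, show (m:Int) * q + (m:Int) = ((q+1) * (m:Int)) by ring]
            exact Int.mul_emod_left _ _
          rw [hq', hr', hre]
          have e1 : ((m:Int) - (m:Int)).toNat = 0 := by omega
          have e2 : ((m:Int) + 1 - (m:Int)).toNat = 1 := by omega
          have e3 : ((0:Int)).toNat = 0 := rfl
          simp [e3, List.replicate_succ]

-- n < 0: both replicate counts are 0, so B's list is empty like A's empty loop.
theorem mod_bounds_neg (s n : Int) (hn : n < 0) :
    n < PySem.Int.mod s n ∧ PySem.Int.mod s n ≤ 0 := by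
  have h := PySem.Int.mod_neg_neg (-s) (-n)
  simp only [neg_neg] at h
  have hp : (0:Int) < -n := by omega
  rw [PySem.Int.mod_eq_emod_of_pos hp] at h
  have h1 := Int.emod_nonneg (-s) (by omega : -n ≠ 0)
  have h2 := Int.emod_lt_of_pos (-s) hp
  omega

-- ===== VERDICT (by name: the statement is the Claim_ definition above) =====
theorem solution_spec : Claim_equal_solution := by
  intro n s _ hpre
  unfold Spec_solution solution solution_alt
  by_cases hq : PySem.Int.floordiv s n == 0
  · simp [hq]
  · simp only [hq, if_false, Bool.false_eq_true]
    rcases lt_or_gt_of_ne hpre with hn | hn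
    · -- n < 0 : loop is empty, and both replicate counts are 0
      rw [PySem.List.pyRange_neg_one_eq_nil (by omega : n ≤ 0)]
      have hb := mod_bounds_neg s n hn
      have e1 : (n - PySem.Int.mod s n).toNat = 0 := by omega
      have e2 : (PySem.Int.mod s n).toNat = 0 := by omega
      simp [e1, e2]
    · -- n > 0
      have hk : n = ((n.toNat : Nat) : Int) := by omega
      rw [hk, fold_eq_distr, distr_closed n.toNat (by omega) s]
      simp
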